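-- pv_equiv track=rewrite | github.com/Do-code-ing/Python_Programmers | Coding_Test_Lv2/31_위클리챌린지_5주차.py | solution
-- ===== SOURCE A (Python) =====
-- def solution(word):
--     db = {
--         4: {"A": 1, "E": 2, "I": 3, "O": 4, "U": 5},
--         3: {"A": 1, "E": 7, "I": 13, "O": 19, "U": 25},
--         2: {"A": 1, "E": 32, "I": 63, "O": 94, "U": 125},
--         1: {"A": 1, "E": 157, "I": 313, "O": 469, "U": 625},
--         0: {"A": 1, "E": 782, "I": 1563, "O": 2344, "U": 3125}
--     }
--
--     answer = 0
--     for key, value in enumerate(word):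
--         answer += db[key][value]
--
--     return answer
-- ===== SOURCE B (Python) =====
-- def solution(word):
--     # Enumerate every vowel word of length <= 5 in DFS (dictionary) preorder;
--     # the answer is the position of `word` in that list ("" is position 0).
--     words = [""]
--
--     def gen(prefix):
--         for v in "AEIOU":
--             w = prefix + v
--             words.append(w)
--             if len(w) < 5:
--                 gen(w)
--
--     gen("")
--     return words.index(word)
-- ===== Notes on version B (the rewrite author's own statement) =====
-- stated objective: alternative
-- what changed: Instead of summing per-position weights from A's hard-coded 5x5 grid, B generates the full dictionary of all 3905 vowel words of length <= 5 in DFS preorder and returns the word's index in that dictionary (with '' at index 0).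
import Mathlib
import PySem

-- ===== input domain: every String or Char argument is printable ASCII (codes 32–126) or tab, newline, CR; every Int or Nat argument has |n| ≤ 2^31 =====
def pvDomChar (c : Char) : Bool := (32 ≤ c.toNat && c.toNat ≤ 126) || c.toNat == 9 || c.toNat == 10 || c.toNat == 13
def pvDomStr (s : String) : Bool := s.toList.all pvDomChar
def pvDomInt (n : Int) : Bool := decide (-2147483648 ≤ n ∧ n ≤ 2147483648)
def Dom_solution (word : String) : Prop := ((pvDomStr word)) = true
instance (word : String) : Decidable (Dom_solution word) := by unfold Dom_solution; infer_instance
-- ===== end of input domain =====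

-- B replaces A's per-position weighted sum over a hard-coded 5x5 grid by a different
-- algorithm: generate the dictionary of all vowel words of length <= 5 in DFS preorder
-- and return the word's index in that list (alternative, same small cost).


-- ===== PORT A =====
-- db[key][value] raises KeyError outside Pre_solution; ported with getD (exact on Pre_solution)
def solution (word : String) : Int :=
  let db : PySem.Dict Int (PySem.Dict Char Int) :=
    PySem.Dict.ofList [
      (4, PySem.Dict.ofList [('A',1),('E',2),('I',3),('O',4),('U',5)]),
      (3, PySem.Dict.ofList [('A',1),('E',7),('I',13),('O',19),('U',25)]),
      (2, PySem.Dict.ofList [('A',1),('E',32),('I',63),('O',94),('U',125)]),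
      (1, PySem.Dict.ofList [('A',1),('E',157),('I',313),('O',469),('U',625)]),
      (0, PySem.Dict.ofList [('A',1),('E',782),('I',1563),('O',2344),('U',3125)])]
  (PySem.List.enumerate word.toList 0).foldl
    (fun answer kv => answer + (((db.get? kv.1).getD PySem.Dict.empty).get? kv.2).getD 0) 0

-- ===== PORT B =====
-- pvGen is Source B's recursive gen(prefix): for each vowel v append prefix+v, recurse
-- while len < 5 (DFS preorder).  The fuel argument only makes the recursion
-- structural: called with fuel 5 the 0-case is unreachable (the len < 5 guard stops first).
def pvVows : List Char := ['A', 'E', 'I', 'O', 'U']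

def pvGen : Nat → List Char → List (List Char)
  | 0, _ => []
  | fuel+1, p => pvVows.flatMap (fun v =>
      (p ++ [v]) :: (if (p ++ [v]).length < 5 then pvGen fuel (p ++ [v]) else []))

-- words.index(word) raises ValueError outside Pre_solution; ported with getD (exact on Pre_solution)
def solution_alt (word : String) : Int :=
  let words := ([] : List Char) :: pvGen 5 []
  ((PySem.List.index? words word.toList).getD 0 : Nat)

-- ===== PRECONDITION & SPEC =====
-- Pre_ excludes exactly the inputs on which A raises KeyError (and B ValueError):
-- a non-vowel character or a length above 5 (positions beyond 4 are absent from db).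
def Pre_solution (word : String) : Prop :=
  word.toList.length ≤ 5 ∧ word.toList.all (fun c => (['A','E','I','O','U'] : List Char).contains c) = true
instance (word : String) : Decidable (Pre_solution word) := by unfold Pre_solution; infer_instance
def pvWitness_solution : String := "AEI"
def Spec_solution (word : String) (out : Int) : Prop := out = solution_alt word
instance (word : String) (out : Int) : Decidable (Spec_solution word out) := by unfold Spec_solution; infer_instance

-- ===== CLAIM (what is proved, stated in full; the proofs are below) =====
def Claim_equal_solution : Prop := ∀ (word : String), Dom_solution word → Pre_solution word → Spec_solution word (solution word)

-- ===== LEMMAS AND PROOFS =====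

-- vowel rank: position of the letter in "AEIOU"
def pvRank (c : Char) : Nat :=
  if c = 'A' then 0 else if c = 'E' then 1 else if c = 'I' then 2 else if c = 'O' then 3 else 4

-- pvGsize k = number of vowel words of length 1..k below a fixed prefix (size of a DFS subtree)
def pvGsize : Nat → Nat
  | 0 => 0
  | k+1 => 5 * (1 + pvGsize k)

-- position of the word p ++ c :: rest inside the DFS list generated below a prefix of length n
def pvVal (n : Nat) : List Char → Nat
  | [] => 0
  | c :: rest => pvRank c * (1 + pvGsize (4 - n)) + (if rest = [] then 0 else 1 + pvVal (n+1) rest)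

-- A-side value of the suffix starting at absolute position n
def pvAVal (n : Nat) : List Char → Nat
  | [] => 0
  | c :: rest => (pvRank c * (1 + pvGsize (4 - n)) + 1) + pvAVal (n+1) rest

-- A's dict literal, named for the proofs (definitionally the db of `solution`)
def pvDb : PySem.Dict Int (PySem.Dict Char Int) :=
  PySem.Dict.ofList [
    (4, PySem.Dict.ofList [('A',1),('E',2),('I',3),('O',4),('U',5)]),
    (3, PySem.Dict.ofList [('A',1),('E',7),('I',13),('O',19),('U',25)]),
    (2, PySem.Dict.ofList [('A',1),('E',32),('I',63),('O',94),('U',125)]),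
    (1, PySem.Dict.ofList [('A',1),('E',157),('I',313),('O',469),('U',625)]),
    (0, PySem.Dict.ofList [('A',1),('E',782),('I',1563),('O',2344),('U',3125)])]

lemma pv_solution_eq (word : String) :
    solution word = (PySem.List.enumerate word.toList 0).foldl
      (fun answer kv => answer + (((pvDb.get? kv.1).getD PySem.Dict.empty).get? kv.2).getD 0) 0 := rfl

-- A's grid cell at (n, c) equals rank(c) * subtree-block-size + 1
lemma pv_cell (n : Nat) (c : Char) (hn : n ≤ 4) (hc : c ∈ pvVows) :
    (((pvDb.get? ((n : Nat) : Int)).getD PySem.Dict.empty).get? c).getD 0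
      = ((pvRank c * (1 + pvGsize (4 - n)) + 1 : Nat) : Int) := by
  interval_cases n <;> fin_cases hc <;> decide

lemma pv_index?_append_of_not_mem {α : Type} [BEq α] [LawfulBEq α] (l t : List α) (v : α)
    (h : v ∉ l) : PySem.List.index? (l ++ t) v = (PySem.List.index? t v).map (· + l.length) := by
  induction l with
  | nil => simp [Option.map_id']
  | cons x xs ih =>
    have hx : x ≠ v := fun he => h (by simp [he])
    rw [List.cons_append, PySem.List.index?_cons_of_ne _ hx, ih (fun hm => h (by simp [hm]))]
    cases PySem.List.index? t v <;> simp
    omega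

-- one DFS block (letter v below prefix p) has size 1 + pvGsize (4 - |p|)
lemma pv_block_len (fuel : Nat) (p : List Char) (v : Char) (hf : 4 - p.length ≤ fuel) :
    ((p ++ [v]) :: (if (p ++ [v]).length < 5 then pvGen fuel (p ++ [v]) else [])).length
      = 1 + pvGsize (4 - p.length) := by
  induction fuel generalizing p v with
  | zero =>
    rw [if_neg (by simp; omega)]
    have h0 : 4 - p.length = 0 := by omega
    simp [h0, pvGsize]
  | succ f ih =>
    by_cases h : p.length < 4
    · rw [if_pos (by simp; omega)]
      have h45 : 4 - p.length = (4 - (p ++ [v]).length) + 1 := by simp; omega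
      simp only [List.length_cons, pvGen]
      rw [List.length_flatMap]
      rw [List.map_congr_left (fun w _ => ih (p ++ [v]) w (by simp; omega))]
      simp [pvVows, h45, pvGsize]
      ring
    · rw [if_neg (by simp; omega)]
      have : 4 - p.length = 0 := by omega
      simp [this, pvGsize]

-- every word generated below prefix p extends p by at least one vowel
lemma pv_gen_shape (fuel : Nat) (p x : List Char) (hx : x ∈ pvGen fuel p) :
    ∃ v t, v ∈ pvVows ∧ x = p ++ v :: t := by
  induction fuel generalizing p with
  | zero => simp [pvGen] at hx
  | succ f ih =>
    simp only [pvGen, List.mem_flatMap] at hx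
    obtain ⟨v, hv, hx⟩ := hx
    rcases List.mem_cons.1 hx with h | h
    · exact ⟨v, [], hv, by simp [h]⟩
    · split at h
      · obtain ⟨v', t', _, he⟩ := ih (p ++ [v]) h
        exact ⟨v, v' :: t', hv, by simp [he]⟩
      · simp at h

-- the target p ++ c :: rest does not occur in the block of a different letter v
lemma pv_not_mem_block (fuel : Nat) (p rest : List Char) (c v : Char) (hne : c ≠ v) :
    (p ++ c :: rest) ∉
      ((p ++ [v]) :: (if (p ++ [v]).length < 5 then pvGen fuel (p ++ [v]) else [])) := by
  intro hmem
  rcases List.mem_cons.1 hmem with h | h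
  · have h2 : c :: rest = [v] := List.append_cancel_left h
    exact hne (by simpa using congrArg (·.head?) h2)
  · split at h
    · obtain ⟨v', t', _, he⟩ := pv_gen_shape _ _ _ h
      rw [List.append_assoc] at he
      have h2 : c :: rest = v :: (v' :: t') := List.append_cancel_left he
      exact hne (by simpa using congrArg (·.head?) h2)
    · simp at h

-- vowel c sits in pvVows after exactly pvRank c other vowels
lemma pv_vows_decomp (c : Char) (hc : c ∈ pvVows) :
    ∃ pre suf, pvVows = pre ++ c :: suf ∧ pre.length = pvRank c ∧ c ∉ pre := by
  fin_cases hc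
  · exact ⟨[], ['E','I','O','U'], rfl, by decide, by decide⟩
  · exact ⟨['A'], ['I','O','U'], rfl, by decide, by decide⟩
  · exact ⟨['A','E'], ['O','U'], rfl, by decide, by decide⟩
  · exact ⟨['A','E','I'], ['U'], rfl, by decide, by decide⟩
  · exact ⟨['A','E','I','O'], [], rfl, by decide, by decide⟩

-- index of p ++ c :: rest within the DFS list generated below prefix p
lemma pv_gen_index (fuel : Nat) (p rest : List Char) (c : Char)
    (hf : 5 - p.length ≤ fuel) (hlen : p.length + 1 + rest.length ≤ 5)
    (hc : c ∈ pvVows) (hrest : ∀ x ∈ rest, x ∈ pvVows) :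
    PySem.List.index? (pvGen fuel p) (p ++ c :: rest) = some (pvVal p.length (c :: rest)) := by
  induction fuel generalizing p rest c with
  | zero => omega
  | succ f ih =>
    have hblock : pvGen (f+1) p =
        (pvVows.map (fun v => (p ++ [v]) :: (if (p ++ [v]).length < 5 then pvGen f (p ++ [v]) else []))).flatten := by
      simp [pvGen, List.flatMap]
    -- index inside c's own block
    have hinner : PySem.List.index?
        ((p ++ [c]) :: (if (p ++ [c]).length < 5 then pvGen f (p ++ [c]) else []))
        (p ++ c :: rest)
        = some (if rest = [] then 0 else 1 + pvVal (p.length + 1) rest) := by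
      cases rest with
      | nil =>
        have h1 : p ++ c :: ([] : List Char) = p ++ [c] := by simp
        rw [h1, PySem.List.index?_cons_self]
        simp
      | cons c' rest' =>
        have hne : p ++ [c] ≠ p ++ c :: c' :: rest' := by
          intro he
          have h2 : ([c] : List Char) = c :: c' :: rest' := List.append_cancel_left he
          simpa using congrArg List.length h2
        rw [PySem.List.index?_cons_of_ne _ hne, if_pos (by simp at hlen ⊢; omega)]
        have hsplit : p ++ c :: c' :: rest' = (p ++ [c]) ++ c' :: rest' := by simp
        rw [hsplit, ih (p ++ [c]) rest' c' (by simp; omega) (by simp at hlen ⊢; omega)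
            (hrest c' (by simp)) (fun x hx => hrest x (by simp [hx]))]
        simp
        omega
    -- skipping the blocks of the pvRank c letters before c
    have hskip : ∀ vs : List Char, c ∉ vs → ∀ t : List (List Char),
        PySem.List.index?
          ((vs.map (fun v => (p ++ [v]) :: (if (p ++ [v]).length < 5 then pvGen f (p ++ [v]) else []))).flatten ++ t)
          (p ++ c :: rest)
        = (PySem.List.index? t (p ++ c :: rest)).map (· + vs.length * (1 + pvGsize (4 - p.length))) := by
      intro vs hcvs
      induction vs with
      | nil => intro t; simp [Option.map_id']
      | cons v vs ihv =>
        intro t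
        have hvne : c ≠ v := fun he => hcvs (by simp [he])
        simp only [List.map_cons, List.flatten_cons, List.append_assoc]
        rw [pv_index?_append_of_not_mem _ _ _ (pv_not_mem_block f p rest c v hvne),
            ihv (fun h => hcvs (by simp [h]))]
        rw [pv_block_len f p v (by omega)]
        cases PySem.List.index? t (p ++ c :: rest) <;> simp
        ring
    obtain ⟨pre, suf, hv, hlenpre, hcpre⟩ := pv_vows_decomp c hc
    rw [hblock, hv]
    rw [List.map_append, List.flatten_append, List.map_cons, List.flatten_cons]
    have hmem : (p ++ c :: rest) ∈
        ((p ++ [c]) :: (if (p ++ [c]).length < 5 then pvGen f (p ++ [c]) else [])) := by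
      have h1 : (PySem.List.index?
          ((p ++ [c]) :: (if (p ++ [c]).length < 5 then pvGen f (p ++ [c]) else []))
          (p ++ c :: rest)).isSome := by rw [hinner]; rfl
      exact (PySem.List.index?_isSome_iff _ _).mp h1
    rw [hskip pre hcpre _, PySem.List.index?_append_of_mem _ hmem, hinner]
    simp only [Option.map_some, Option.some.injEq, hlenpre]
    by_cases hr : rest = []
    · simp [hr, pvVal]
    · simp [hr, pvVal]
      ring

-- A's fold over the enumerated word, with absolute start position n
lemma pv_A_fold (l : List Char) : ∀ (n : Nat) (acc : Int), n + l.length ≤ 5 →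
    (∀ x ∈ l, x ∈ pvVows) →
    (PySem.List.enumerate l ((n : Nat) : Int)).foldl
      (fun answer kv => answer + (((pvDb.get? kv.1).getD PySem.Dict.empty).get? kv.2).getD 0) acc
    = acc + ((pvAVal n l : Nat) : Int) := by
  induction l with
  | nil => intro n acc _ _; simp [PySem.List.enumerate_nil, pvAVal]
  | cons c rest ih =>
    intro n acc hlen hvow
    rw [PySem.List.enumerate_cons, List.foldl_cons]
    have hcast : ((n : Int) + 1) = (((n+1 : Nat) : Nat) : Int) := by push_cast; ring
    rw [pv_cell n c (by simp at hlen; omega) (hvow c (by simp)), hcast,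
        ih (n+1) _ (by simp at hlen ⊢; omega) (fun x hx => hvow x (by simp [hx]))]
    simp [pvAVal]
    ring

lemma pv_AVal_val (l : List Char) : ∀ n, pvAVal n l = if l = [] then 0 else 1 + pvVal n l := by
  induction l with
  | nil => intro n; simp [pvAVal]
  | cons c rest ih =>
    intro n
    simp only [pvAVal, pvVal, ih (n+1)]
    split_ifs <;> simp_all <;> omega

-- ===== VERDICT (by name: the statement is the Claim_ definition above) =====
theorem solution_spec : Claim_equal_solution := by
  intro word _ hpre
  obtain ⟨hlen, hall⟩ := hpre
  have hvow : ∀ x ∈ word.toList, x ∈ pvVows := by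
    intro x hx
    have := List.all_eq_true.1 hall x hx
    simpa [pvVows] using this
  unfold Spec_solution
  have hA : solution word = ((pvAVal 0 word.toList : Nat) : Int) := by
    rw [pv_solution_eq]
    have := pv_A_fold word.toList 0 0 (by omega) hvow
    simpa using this
  have hB : solution_alt word
      = (((if word.toList = [] then 0 else 1 + pvVal 0 word.toList) : Nat) : Int) := by
    cases h : word.toList with
    | nil => simp [solution_alt, h]
    | cons c rest =>
      have hne : ([] : List Char) ≠ c :: rest := by simp
      simp only [solution_alt, h]
      rw [PySem.List.index?_cons_of_ne _ hne]
      have hidx := pv_gen_index 5 [] rest c (by simp) (by rw [h] at hlen; simp at hlen ⊢; omega)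
        (hvow c (by simp [h])) (fun x hx => hvow x (by simp [h, hx]))
      simp only [List.nil_append, List.length_nil] at hidx
      rw [hidx]
      simp
      omega
  rw [hA, hB, pv_AVal_val]
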